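-- pv_equiv track=rewrite | github.com/justacow224/DACN | ML-KEM/SHA3.py | iota
-- ===== SOURCE A (Python) =====
-- RC_CACHE = {}
--
-- def rc(t):
--     """ Algorithm 5: rc(t) - Round constant generation"""
--     if t in RC_CACHE:
--         return RC_CACHE[t]
--
--     if t % 255 == 0:
--         return 1
--
--     # R = 10000000
--     R = [1, 0, 0, 0, 0, 0, 0, 0]
--
--     # For i from 1 to t mod 255
--     for _ in range(t % 255):
--         # R = 0 || R
--         R.insert(0, 0)
--
--         # [cite: 494-497] LFSR taps
--         R[0] = R[0] ^ R[8]
--         R[4] = R[4] ^ R[8]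
--         R[5] = R[5] ^ R[8]
--         R[6] = R[6] ^ R[8]
--
--         # R = Trunc_8(R)
--         R = R[:8]
--
--     # Return R[0]
--     result = R[0]
--     RC_CACHE[t] = result
--     return result
--
-- def iota(A, i_r):
--     """ Algorithm 6: iota"""
--     A_out = [row[:] for row in A] # Deep copy
--
--     # Step 2: RC = 0^w
--     RC_int = 0
--
--     # Step 3: l=6
--     for j in range(7): # 0 to l (which is 6)
--         bit_pos = (1 << j) - 1 # 2^j - 1
--         bit = rc(j + 7 * i_r)
--         RC_int |= (bit << bit_pos)
--
--     # Step 4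
--     A_out[0][0] = A_out[0][0] ^ RC_int
--     return A_out
-- ===== SOURCE B (Python) =====
-- def _build_rc_table():
--     # rc bits for t = 0..254, generated incrementally by one LFSR run
--     bits = [0] * 255
--     bits[0] = 1
--     R = [1, 0, 0, 0, 0, 0, 0, 0]
--     for t in range(1, 255):
--         R.insert(0, 0)
--         R[0] ^= R[8]
--         R[4] ^= R[8]
--         R[5] ^= R[8]
--         R[6] ^= R[8]
--         R = R[:8]
--         bits[t] = R[0]
--     # full round-constant word for each residue of i_r mod 255
--     table = []
--     for m in range(255):
--         w = 0
--         for j in range(7):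
--             w |= bits[(j + 7 * m) % 255] << ((1 << j) - 1)
--         table.append(w)
--     return table
--
--
-- RC_TABLE = _build_rc_table()
--
--
-- def iota(A, i_r):
--     A_out = [row[:] for row in A]
--     A_out[0][0] ^= RC_TABLE[i_r % 255]
--     return A_out
-- ===== Notes on version B (the rewrite author's own statement) =====
-- stated objective: idiomatic
-- what changed: B precomputes once a 255-entry table of full round-constant words (one incremental LFSR pass instead of restarting rc(t) from scratch for each bit) and iota just indexes the table with i_r % 255 and XORs into A[0][0], replacing A's seven per-call rc() runs of up to 254 LFSR steps each.
import Mathlib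
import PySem

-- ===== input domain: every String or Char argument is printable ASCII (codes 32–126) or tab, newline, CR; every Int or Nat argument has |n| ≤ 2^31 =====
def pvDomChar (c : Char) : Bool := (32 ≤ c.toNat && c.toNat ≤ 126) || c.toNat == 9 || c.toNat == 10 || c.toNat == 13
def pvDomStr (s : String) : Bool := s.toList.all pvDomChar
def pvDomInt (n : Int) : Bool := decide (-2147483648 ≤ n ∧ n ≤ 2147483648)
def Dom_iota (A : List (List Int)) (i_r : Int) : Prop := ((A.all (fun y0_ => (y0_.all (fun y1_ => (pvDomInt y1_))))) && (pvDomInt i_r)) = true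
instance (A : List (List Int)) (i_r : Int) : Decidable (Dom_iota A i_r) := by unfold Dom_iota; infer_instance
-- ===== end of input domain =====

-- B replaces A's seven per-call rc() LFSR runs by a round-constant word table built once (idiomatic); return-value equivalence only.

-- ===== PORT A =====
-- rc(t) ported without the module-level memo cache (the cache only avoids recomputation).
def rcA (t : Int) : Int :=
  if PySem.Int.mod t 255 = 0 then 1
  else
    let R := (List.range (PySem.Int.mod t 255).toNat).foldl (fun (R : List Int) _ =>
      let R := (0 : Int) :: R
      let R := R.set 0 (PySem.Int.bxor (R.getD 0 0) (R.getD 8 0))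
      let R := R.set 4 (PySem.Int.bxor (R.getD 4 0) (R.getD 8 0))
      let R := R.set 5 (PySem.Int.bxor (R.getD 5 0) (R.getD 8 0))
      let R := R.set 6 (PySem.Int.bxor (R.getD 6 0) (R.getD 8 0))
      R.take 8) [1, 0, 0, 0, 0, 0, 0, 0]
    R.getD 0 0

def iota (A : List (List Int)) (i_r : Int) : List (List Int) :=
  let A_out := A.map (fun row => row)   -- [row[:] for row in A]
  let RC_int := (List.range 7).foldl (fun acc (j : Nat) =>
      let bit_pos := ((1 : Int) <<< j) - 1
      let bit := rcA ((j : Int) + 7 * i_r)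
      PySem.Int.bor acc (bit <<< bit_pos.toNat)) 0
  -- A_out[0][0] = A_out[0][0] ^ RC_int  (IndexError on empty shapes: excluded by Pre_)
  match A_out with
  | [] => []
  | r :: rest =>
    match r with
    | [] => [] :: rest
    | x :: xs => (PySem.Int.bxor x RC_int :: xs) :: rest

-- ===== PORT B =====
-- bits[t] = rc(t) for t = 0..254, generated incrementally by one LFSR run
def rcBits : List Int :=
  let bits := (List.replicate 255 (0 : Int)).set 0 1
  let st := (List.range' 1 254).foldl (fun (st : List Int × List Int) t =>
      let R := (0 : Int) :: st.2
      let R := R.set 0 (PySem.Int.bxor (R.getD 0 0) (R.getD 8 0))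
      let R := R.set 4 (PySem.Int.bxor (R.getD 4 0) (R.getD 8 0))
      let R := R.set 5 (PySem.Int.bxor (R.getD 5 0) (R.getD 8 0))
      let R := R.set 6 (PySem.Int.bxor (R.getD 6 0) (R.getD 8 0))
      let R := R.take 8
      (st.1.set t (R.getD 0 0), R)) (bits, [1, 0, 0, 0, 0, 0, 0, 0])
  st.1

-- full round-constant word for each residue of i_r mod 255
def rcTable : List Int :=
  (List.range 255).foldl (fun table m =>
    let w := (List.range 7).foldl (fun w j =>
        PySem.Int.bor w ((rcBits.getD ((j + 7 * m) % 255) 0) <<< (((1 : Int) <<< j) - 1).toNat)) 0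
    table ++ [w]) []

def iota_alt (A : List (List Int)) (i_r : Int) : List (List Int) :=
  let A_out := A.map (fun row => row)
  let w := rcTable.getD (PySem.Int.mod i_r 255).toNat 0
  match A_out with
  | [] => []
  | r :: rest =>
    match r with
    | [] => [] :: rest
    | x :: xs => (PySem.Int.bxor x w :: xs) :: rest

-- ===== PRECONDITION & SPEC =====
-- Pre_ excludes only the shapes on which Python's A[0][0] raises IndexError: empty A or empty first row.
def Pre_iota (A : List (List Int)) (i_r : Int) : Prop := A ≠ [] ∧ A.headD [] ≠ []
instance (A : List (List Int)) (i_r : Int) : Decidable (Pre_iota A i_r) := by unfold Pre_iota; infer_instance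
def pvWitness_iota : List (List Int) × Int := ([[5, 2], [3]], 1)

def Spec_iota (A : List (List Int)) (i_r : Int) (out : List (List Int)) : Prop := out = iota_alt A i_r
instance (A : List (List Int)) (i_r : Int) (out : List (List Int)) : Decidable (Spec_iota A i_r out) := by unfold Spec_iota; infer_instance

-- ===== CLAIM (what is proved, stated in full; the proofs are below) =====
def Claim_equal_iota : Prop := ∀ (A : List (List Int)) (i_r : Int), Dom_iota A i_r → Pre_iota A i_r → Spec_iota A i_r (iota A i_r)

-- ===== LEMMAS AND PROOFS =====

-- A's per-call round-constant word, as iota computes it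
def wordA (i_r : Int) : Int :=
  (List.range 7).foldl (fun acc (j : Nat) =>
      let bit_pos := ((1 : Int) <<< j) - 1
      let bit := rcA ((j : Int) + 7 * i_r)
      PySem.Int.bor acc (bit <<< bit_pos.toNat)) 0

theorem rcA_congr {t s : Int} (h : PySem.Int.mod t 255 = PySem.Int.mod s 255) : rcA t = rcA s := by
  unfold rcA; rw [h]

theorem rcA_shift (j : Nat) (i_r : Int) :
    rcA ((j : Int) + 7 * i_r) = rcA ((j : Int) + 7 * PySem.Int.mod i_r 255) := by
  apply rcA_congr
  simp only [PySem.Int.mod_eq_emod_of_pos (show (0 : Int) < 255 by norm_num)]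
  omega

theorem wordA_mod (i_r : Int) : wordA i_r = wordA (PySem.Int.mod i_r 255) := by
  unfold wordA
  apply PySem.List.foldl_congr_mem
  intro acc j _
  show PySem.Int.bor acc (rcA ((j : Int) + 7 * i_r) <<< (((1 : Int) <<< j) - 1).toNat)
     = PySem.Int.bor acc (rcA ((j : Int) + 7 * PySem.Int.mod i_r 255) <<< (((1 : Int) <<< j) - 1).toNat)
  rw [rcA_shift]

-- rc(t) and the incremental LFSR run agree bit by bit
set_option maxRecDepth 100000 in
theorem bits_eq_list : (List.range 255).map (fun (t : Nat) => rcA (t : Int)) = rcBits := by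
  decide

theorem bits_eq (t : Nat) (ht : t < 255) : rcA (t : Int) = rcBits.getD t 0 := by
  rw [← bits_eq_list, PySem.List.getD_map_range _ _ _ _ ht]

theorem rcA_eq_bits (j m : Nat) : rcA ((j : Int) + 7 * (m : Int)) = rcBits.getD ((j + 7 * m) % 255) 0 := by
  have hlt : (j + 7 * m) % 255 < 255 := Nat.mod_lt _ (by norm_num)
  have h : rcA ((j : Int) + 7 * (m : Int)) = rcA ((((j + 7 * m) % 255 : Nat) : Int)) := by
    apply rcA_congr
    simp only [PySem.Int.mod_eq_emod_of_pos (show (0 : Int) < 255 by norm_num)]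
    push_cast
    omega
  rw [h]
  exact bits_eq _ hlt

theorem rcTable_eq : rcTable = (List.range 255).map (fun m =>
    (List.range 7).foldl (fun w j =>
      PySem.Int.bor w ((rcBits.getD ((j + 7 * m) % 255) 0) <<< (((1 : Int) <<< j) - 1).toNat)) 0) := by
  unfold rcTable
  exact PySem.List.foldl_append_singleton_eq_map _ _ []

theorem wordA_table (m : Nat) (hm : m < 255) : wordA (m : Int) = rcTable.getD m 0 := by
  rw [rcTable_eq, PySem.List.getD_map_range _ _ _ _ hm]
  unfold wordA
  apply PySem.List.foldl_congr_mem
  intro acc j _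
  show PySem.Int.bor acc (rcA ((j : Int) + 7 * (m : Int)) <<< (((1 : Int) <<< j) - 1).toNat)
     = PySem.Int.bor acc ((rcBits.getD ((j + 7 * m) % 255) 0) <<< (((1 : Int) <<< j) - 1).toNat)
  rw [rcA_eq_bits]

theorem word_eq (i_r : Int) : wordA i_r = rcTable.getD (PySem.Int.mod i_r 255).toNat 0 := by
  have h0 : (0 : Int) <= PySem.Int.mod i_r 255 := PySem.Int.mod_nonneg i_r (by norm_num)
  have h1 : PySem.Int.mod i_r 255 < 255 := PySem.Int.mod_lt i_r (by norm_num)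
  have hm : PySem.Int.mod i_r 255 = ((PySem.Int.mod i_r 255).toNat : Int) := by omega
  have hlt : (PySem.Int.mod i_r 255).toNat < 255 := by omega
  rw [wordA_mod, hm]
  exact wordA_table _ hlt

-- ===== VERDICT (by name: the statement is the Claim_ definition above) =====
theorem iota_spec : Claim_equal_iota := by
  intro A i_r _ hpre
  obtain ⟨h1, h2⟩ := hpre
  match A with
  | [] => exact absurd rfl h1
  | [] :: rest => exact absurd rfl h2
  | (x :: xs) :: rest =>
    show iota ((x :: xs) :: rest) i_r = iota_alt ((x :: xs) :: rest) i_r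
    simp only [iota, iota_alt, List.map_cons]
    rw [show ((List.range 7).foldl (fun acc (j : Nat) =>
      let bit_pos := ((1 : Int) <<< j) - 1
      let bit := rcA ((j : Int) + 7 * i_r)
      PySem.Int.bor acc (bit <<< bit_pos.toNat)) 0) = wordA i_r from rfl, word_eq]
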